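-- pv_equiv track=rewrite | github.com/DSmmartin/skills_talk_agent_camp_2026 | scripts/validate_schema.py | diff_schemas
-- ===== SOURCE A (Python) =====
-- def diff_schemas(
--     yaml_cols: dict[str, str],
--     live_cols: dict[str, str],
-- ) -> tuple[list[str], list[str], list[tuple[str, str, str]]]:
--     """
--     Returns:
--         added   — in live DB but not in YAML contract
--         removed — in YAML contract but not in live DB
--         changed — in both but different types: [(name, yaml_type, live_type)]
--     """
--     yaml_names = set(yaml_cols)
--     live_names = set(live_cols)
--
--     added = sorted(live_names - yaml_names)
--     removed = sorted(yaml_names - live_names)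
--     changed = sorted(
--         (name, yaml_cols[name], live_cols[name])
--         for name in yaml_names & live_names
--         if yaml_cols[name] != live_cols[name]
--     )
--     return added, removed, changed
-- ===== SOURCE B (Python) =====
-- def diff_schemas(
--     yaml_cols: dict[str, str],
--     live_cols: dict[str, str],
-- ) -> tuple[list[str], list[str], list[tuple[str, str, str]]]:
--     added, removed, changed = [], [], []
--     for name in sorted(set(yaml_cols) | set(live_cols)):
--         if name not in yaml_cols:
--             added.append(name)
--         elif name not in live_cols:
--             removed.append(name)
--         else:
--             yt, lt = yaml_cols[name], live_cols[name]
--             if yt != lt: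
--                 changed.append((name, yt, lt))
--     return added, removed, changed
-- ===== Notes on version B (the rewrite author's own statement) =====
-- stated objective: alternative
-- what changed: Replaces three separate set operations each followed by its own sort with one sorted pass over the union of column names that classifies each name into added/removed/changed with a single membership/type check, so no per-list sort is needed.
import Mathlib
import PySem

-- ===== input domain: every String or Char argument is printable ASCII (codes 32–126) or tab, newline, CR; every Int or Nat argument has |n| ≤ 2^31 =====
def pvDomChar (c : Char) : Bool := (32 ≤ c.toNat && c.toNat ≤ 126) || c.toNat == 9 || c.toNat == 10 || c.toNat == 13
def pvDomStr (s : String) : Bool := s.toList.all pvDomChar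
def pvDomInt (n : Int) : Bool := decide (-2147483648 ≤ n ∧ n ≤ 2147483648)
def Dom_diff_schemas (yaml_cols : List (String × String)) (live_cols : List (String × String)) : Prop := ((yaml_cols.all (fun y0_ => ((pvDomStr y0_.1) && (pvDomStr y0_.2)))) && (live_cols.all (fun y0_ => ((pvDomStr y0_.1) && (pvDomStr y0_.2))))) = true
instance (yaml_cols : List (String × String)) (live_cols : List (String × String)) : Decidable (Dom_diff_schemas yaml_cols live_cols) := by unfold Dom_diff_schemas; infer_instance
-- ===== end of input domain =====

-- B replaces A's three set-differences each with its own sort by ONE sorted pass over the union of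
-- column names that classifies each name; same asymptotic cost (objective: alternative decomposition).


-- ===== PORT A =====
-- yaml_cols[name] is only evaluated for name ∈ keys, so Dict.getD with a dummy default is exact here.
-- A sorts the changed tuples lexicographically; their first components (elements of a set) are
-- pairwise distinct, so that sort coincides with sorting by the name — ported with key = fst.
def diff_schemas (yaml_cols : List (String × String)) (live_cols : List (String × String)) : List String × List String × (List (String × String × String)) :=
  let yaml_names : PySem.Set String := PySem.Set.ofList (PySem.Dict.keys (PySem.Dict.mk yaml_cols))
  let live_names : PySem.Set String := PySem.Set.ofList (PySem.Dict.keys (PySem.Dict.mk live_cols))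
  let added := PySem.List.sorted (PySem.Set.diff live_names yaml_names) (fun x => x) false
  let removed := PySem.List.sorted (PySem.Set.diff yaml_names live_names) (fun x => x) false
  let changed := PySem.List.sorted
      (((PySem.Set.inter yaml_names live_names).filter
          (fun n => PySem.Dict.getD (PySem.Dict.mk yaml_cols) n "" != PySem.Dict.getD (PySem.Dict.mk live_cols) n "")).map
        (fun n => (n, PySem.Dict.getD (PySem.Dict.mk yaml_cols) n "", PySem.Dict.getD (PySem.Dict.mk live_cols) n "")))
      (fun t => t.1) false
  (added, removed, changed)

-- ===== PORT B =====
def diff_schemas_alt (yaml_cols : List (String × String)) (live_cols : List (String × String)) : List String × List String × (List (String × String × String)) :=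
  let allNames := PySem.List.sorted
      (PySem.Set.union (PySem.Set.ofList (PySem.Dict.keys (PySem.Dict.mk yaml_cols))) (PySem.Dict.keys (PySem.Dict.mk live_cols)))
      (fun x => x) false
  allNames.foldl (fun acc n =>
    if !(PySem.Dict.contains (PySem.Dict.mk yaml_cols) n) then (acc.1 ++ [n], acc.2.1, acc.2.2)
    else if !(PySem.Dict.contains (PySem.Dict.mk live_cols) n) then (acc.1, acc.2.1 ++ [n], acc.2.2)
    else
      let yt := PySem.Dict.getD (PySem.Dict.mk yaml_cols) n ""
      let lt := PySem.Dict.getD (PySem.Dict.mk live_cols) n ""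
      if yt != lt then (acc.1, acc.2.1, acc.2.2 ++ [(n, yt, lt)]) else acc)
    ([], [], [])

-- ===== PRECONDITION & SPEC =====
def Spec_diff_schemas (yaml_cols : List (String × String)) (live_cols : List (String × String)) (out : List String × List String × (List (String × String × String))) : Prop := out = diff_schemas_alt yaml_cols live_cols
instance (yaml_cols : List (String × String)) (live_cols : List (String × String)) (out : List String × List String × (List (String × String × String))) : Decidable (Spec_diff_schemas yaml_cols live_cols out) := by unfold Spec_diff_schemas; infer_instance

-- ===== CLAIM (what is proved, stated in full; the proofs are below) =====
def Claim_equal_diff_schemas : Prop := ∀ (yaml_cols : List (String × String)) (live_cols : List (String × String)), Dom_diff_schemas yaml_cols live_cols → Spec_diff_schemas yaml_cols live_cols (diff_schemas yaml_cols live_cols)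

-- ===== LEMMAS AND PROOFS =====

theorem pairwise_lt_of_le_nodup {l : List String}
    (hle : l.Pairwise (· ≤ ·)) (hnd : l.Nodup) : l.Pairwise (· < ·) :=
  (hle.and hnd).imp (fun h => lt_of_le_of_ne h.1 h.2)

theorem diff_schemas_eq (y l : List (String × String)) :
    diff_schemas y l = diff_schemas_alt y l := by
  simp only [diff_schemas, diff_schemas_alt]
  set yd := PySem.Dict.mk y with hyd
  set ld := PySem.Dict.mk l with hld
  set Y := PySem.Set.ofList yd.keys with hY
  set L := PySem.Set.ofList ld.keys with hL
  set U := PySem.List.sorted (PySem.Set.union Y ld.keys) (fun x => x) false with hU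
  have hstep : (fun (acc : List String × List String × List (String × String × String)) n =>
      if !(yd.contains n) then (acc.1 ++ [n], acc.2.1, acc.2.2)
      else if !(ld.contains n) then (acc.1, acc.2.1 ++ [n], acc.2.2)
      else
        let yt := yd.getD n ""
        let lt := ld.getD n ""
        if yt != lt then (acc.1, acc.2.1, acc.2.2 ++ [(n, yt, lt)]) else acc)
    = (fun acc n =>
      ((fun (a : List String) n => if !(yd.contains n) then a ++ [n] else a) acc.1 n,
       (fun (rc : List String × List (String × String × String)) n =>
         ((fun (r : List String) n => if yd.contains n && !(ld.contains n) then r ++ [n] else r) rc.1 n,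
          (fun (c : List (String × String × String)) n =>
            if yd.contains n && ld.contains n && (yd.getD n "" != ld.getD n "")
            then c ++ [(n, yd.getD n "", ld.getD n "")] else c) rc.2 n)) acc.2 n)) := by
    funext acc n
    by_cases hcy : yd.contains n <;> by_cases hcl : ld.contains n <;>
      simp [hcy, hcl]
    split <;> rfl
  rw [hstep]
  rw [PySem.List.foldl_prod_mk
        (f := fun (a : List String) n => if !(yd.contains n) then a ++ [n] else a)
        (g := fun (rc : List String × List (String × String × String)) n =>
          ((fun (r : List String) n => if yd.contains n && !(ld.contains n) then r ++ [n] else r) rc.1 n,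
           (fun (c : List (String × String × String)) n =>
             if yd.contains n && ld.contains n && (yd.getD n "" != ld.getD n "")
             then c ++ [(n, yd.getD n "", ld.getD n "")] else c) rc.2 n))]
  rw [PySem.List.foldl_prod_mk
        (f := fun (r : List String) n => if yd.contains n && !(ld.contains n) then r ++ [n] else r)
        (g := fun (c : List (String × String × String)) n =>
          if yd.contains n && ld.contains n && (yd.getD n "" != ld.getD n "")
          then c ++ [(n, yd.getD n "", ld.getD n "")] else c)]
  rw [PySem.List.foldl_append_if_eq_filter (fun n => !(yd.contains n)),
      PySem.List.foldl_append_if_eq_filter (fun n => yd.contains n && !(ld.contains n)),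
      PySem.List.foldl_append_if (fun n => yd.contains n && ld.contains n && (yd.getD n "" != ld.getD n ""))
        (fun n => (n, yd.getD n "", ld.getD n ""))]
  simp only [List.nil_append]
  have hUnd : U.Nodup :=
    (PySem.List.sorted_perm _ _ _).nodup_iff.mpr
      (PySem.Set.nodup_union Y _ (PySem.Set.nodup_ofList _))
  have hUlt : U.Pairwise (· < ·) :=
    pairwise_lt_of_le_nodup (PySem.List.sorted_pairwise _ _) hUnd
  have hUm : ∀ n : String, n ∈ U ↔ n ∈ yd.keys ∨ n ∈ ld.keys := by
    intro n
    rw [hU, (PySem.List.sorted_perm _ _ _).mem_iff, PySem.Set.mem_union, hY,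
        PySem.Set.mem_ofList]
  simp only [Prod.mk.injEq]
  refine ⟨?_, ?_, ?_⟩
  · apply PySem.List.sorted_eq_of_perm_of_pairwise_lt
    · rw [List.perm_ext_iff_of_nodup (hUnd.filter _)
            (PySem.Set.nodup_diff _ _ (PySem.Set.nodup_ofList _))]
      intro a
      simp only [List.mem_filter, hUm a, PySem.Set.mem_diff, hY, PySem.Set.mem_ofList,
        Bool.not_eq_true', ← Bool.not_eq_true, PySem.Dict.contains_iff_mem_keys]
      tauto
    · exact hUlt.filter _
  · apply PySem.List.sorted_eq_of_perm_of_pairwise_lt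
    · rw [List.perm_ext_iff_of_nodup (hUnd.filter _)
            (PySem.Set.nodup_diff _ _ (PySem.Set.nodup_ofList _))]
      intro a
      simp only [List.mem_filter, hUm a, PySem.Set.mem_diff, hL, PySem.Set.mem_ofList,
        Bool.and_eq_true, Bool.not_eq_true', ← Bool.not_eq_true, PySem.Dict.contains_iff_mem_keys]
      tauto
    · exact hUlt.filter _
  · apply PySem.List.sorted_eq_of_perm_of_pairwise_lt
    · apply List.Perm.map
      rw [List.perm_ext_iff_of_nodup (hUnd.filter _)
            ((PySem.Set.nodup_inter _ _ (PySem.Set.nodup_ofList _)).filter _)]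
      intro a
      simp only [List.mem_filter, hUm a, PySem.Set.mem_inter, hL, PySem.Set.mem_ofList,
        Bool.and_eq_true, PySem.Dict.contains_iff_mem_keys]
      tauto
    · rw [List.pairwise_map]
      exact hUlt.filter _

-- ===== VERDICT (by name: the statement is the Claim_ definition above) =====
theorem diff_schemas_spec : Claim_equal_diff_schemas := by
  intro y l _
  unfold Spec_diff_schemas
  exact diff_schemas_eq y l
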